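-- pv_equiv track=rewrite | github.com/alexhanganu/nimb | v02003/utility/get_MRIs_ppmi_v2.py | exclude_MR_types
-- ===== SOURCE A (Python) =====
-- def exclude_MR_types(ls):
-- 	exclude_MR_types = ['calibration','localizer','loc','moco','perfusion','tse',
-- 						'survey','scout','hippo','cbf','isotropic','fractional',
-- 						'pasl','multi_reset','dual_echo','gre','average_dc',]
-- 	ls_iter = ls.copy()
-- 	for mr_path in ls_iter:
-- 		for ex_type in exclude_MR_types:
-- 			if ex_type.lower() in mr_path.lower():
-- 				ls.remove(mr_path)
-- 				break
-- 	return ls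
-- ===== SOURCE B (Python) =====
-- import re
--
-- def exclude_MR_types(ls):
--     excluded = ['calibration','localizer','loc','moco','perfusion','tse',
--                 'survey','scout','hippo','cbf','isotropic','fractional',
--                 'pasl','multi_reset','dual_echo','gre','average_dc',]
--     pat = re.compile('|'.join(map(re.escape, excluded)), re.IGNORECASE)
--     ls[:] = [p for p in ls if not pat.search(p)]
--     return ls
-- ===== Notes on version B (the rewrite author's own statement) =====
-- stated objective: idiomatic
-- what changed: Replaces the nested loop that mutates ls via list.remove while iterating a copy (quadratic removals) with a single compiled case-insensitive regex alternation and one in-place filtering comprehension per path.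
import Mathlib
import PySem

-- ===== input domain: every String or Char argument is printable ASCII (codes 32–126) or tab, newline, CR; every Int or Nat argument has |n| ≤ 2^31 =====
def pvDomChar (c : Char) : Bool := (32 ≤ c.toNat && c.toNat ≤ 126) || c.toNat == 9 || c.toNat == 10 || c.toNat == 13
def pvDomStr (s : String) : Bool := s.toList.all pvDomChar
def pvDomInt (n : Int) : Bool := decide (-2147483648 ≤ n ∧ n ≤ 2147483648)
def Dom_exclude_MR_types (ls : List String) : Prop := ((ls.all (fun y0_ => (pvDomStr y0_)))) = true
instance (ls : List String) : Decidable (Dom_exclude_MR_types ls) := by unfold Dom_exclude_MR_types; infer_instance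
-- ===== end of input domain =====

-- B replaces A's mutate-while-iterating nested loop (list.remove per match) by one combined
-- case-insensitive pattern and a single in-place filtering pass (idiomatic). Both A and B mutate
-- the argument list in place; the theorem is about the returned value.

-- ===== PORT A =====
def pvExTypes : List String :=
  ["calibration","localizer","loc","moco","perfusion","tse",
   "survey","scout","hippo","cbf","isotropic","fractional",
   "pasl","multi_reset","dual_echo","gre","average_dc"]

-- for mr_path in ls_iter: for ex_type …: if ex_type.lower() in mr_path.lower(): ls.remove(mr_path); break
-- inner loop with break at the first match = List.any; ls.remove never raises here (proved below),
-- so the unreachable 'none' branch of remove? keeps the state (.getD acc).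
def exclude_MR_types (ls : List String) : List String :=
  ls.foldl (fun acc mr_path =>
    if pvExTypes.any (fun ex_type => PySem.Str.isIn (PySem.Str.lower ex_type) (PySem.Str.lower mr_path)) then
      (PySem.List.remove? acc mr_path).getD acc
    else acc) ls

-- ===== PORT B =====
-- Source B: pat = re.compile('|'.join(map(re.escape, excluded)), re.IGNORECASE); ls[:] = [p for p in ls if not pat.search(p)]
-- pat.search(p) for this literal alternation of plain lowercase words is exact as: some word is a
-- substring of p.lower() (re.escape of these words is the identity; IGNORECASE = lowercase containment on ASCII).
def pvSearchExcluded (p : String) : Bool :=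
  pvExTypes.any (fun t => PySem.Str.isIn t (PySem.Str.lower p))

def exclude_MR_types_alt (ls : List String) : List String :=
  ls.filter (fun p => !pvSearchExcluded p)

-- ===== PRECONDITION & SPEC =====
def Spec_exclude_MR_types (ls : List String) (out : List String) : Prop := out = exclude_MR_types_alt ls
instance (ls : List String) (out : List String) : Decidable (Spec_exclude_MR_types ls out) := by unfold Spec_exclude_MR_types; infer_instance

-- ===== CLAIM (what is proved, stated in full; the proofs are below) =====
def Claim_equal_exclude_MR_types : Prop := ∀ (ls : List String), Dom_exclude_MR_types ls → Spec_exclude_MR_types ls (exclude_MR_types ls)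

-- ===== LEMMAS AND PROOFS =====

-- the excluded words are already lowercase, so A's ex_type.lower() is the identity on each of them
theorem pvLower_exTypes : pvExTypes.map PySem.Str.lower = pvExTypes := by decide

theorem pvBad_eq (p : String) :
    pvExTypes.any (fun ex_type => PySem.Str.isIn (PySem.Str.lower ex_type) (PySem.Str.lower p))
      = pvSearchExcluded p := by
  unfold pvSearchExcluded
  conv_rhs => rw [← pvLower_exTypes]
  rw [List.any_map]
  rfl

theorem pvRemove_first {α : Type} [DecidableEq α] (l1 l2 : List α) (p : α) (h : p ∉ l1) :
    PySem.List.remove? (l1 ++ p :: l2) p = some (l1 ++ l2) := by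
  induction l1 with
  | nil => simp [PySem.List.remove?_cons_self]
  | cons x xs ih =>
      have hx : x ≠ p := by intro e; exact h (by simp [e])
      have hxs : p ∉ xs := fun hm => h (List.mem_cons_of_mem _ hm)
      simp [PySem.List.remove?_cons_of_ne _ hx, ih hxs]

theorem pvLoop_inv (rest : List String) : ∀ kept : List String,
    (∀ x ∈ kept, pvSearchExcluded x = false) →
    rest.foldl (fun acc mr_path =>
      if pvSearchExcluded mr_path then
        (PySem.List.remove? acc mr_path).getD acc
      else acc) (kept ++ rest)
      = kept ++ rest.filter (fun p => !pvSearchExcluded p) := by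
  induction rest with
  | nil => intro kept _; simp
  | cons p rest ih =>
      intro kept hkept
      simp only [List.foldl_cons]
      by_cases hp : pvSearchExcluded p = true
      · have hnot : p ∉ kept := fun hm => by simp [hkept p hm] at hp
        rw [if_pos hp, pvRemove_first kept rest p hnot]
        simpa [hp] using ih kept hkept
      · have hp' : pvSearchExcluded p = false := by
          cases h : pvSearchExcluded p with
          | false => rfl
          | true => exact absurd h hp
        rw [if_neg hp]
        have hkept' : ∀ x ∈ kept ++ [p], pvSearchExcluded x = false := by
          intro x hx
          rcases List.mem_append.mp hx with h1 | h2
          · exact hkept x h1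
          · simp at h2; simpa [h2] using hp'
        have := ih (kept ++ [p]) hkept'
        simpa [hp', List.append_assoc] using this

-- ===== VERDICT (by name: the statement is the Claim_ definition above) =====
theorem exclude_MR_types_spec : Claim_equal_exclude_MR_types := by
  intro ls _
  unfold Spec_exclude_MR_types exclude_MR_types exclude_MR_types_alt
  have hfun : (fun (acc : List String) (mr_path : String) =>
      if pvExTypes.any (fun ex_type => PySem.Str.isIn (PySem.Str.lower ex_type) (PySem.Str.lower mr_path)) then
        (PySem.List.remove? acc mr_path).getD acc
      else acc)
    = (fun (acc : List String) (mr_path : String) =>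
      if pvSearchExcluded mr_path then
        (PySem.List.remove? acc mr_path).getD acc
      else acc) := by
    funext acc mr_path
    rw [pvBad_eq]
  rw [hfun]
  simpa using pvLoop_inv ls [] (by simp)
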